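-- pv_equiv track=rewrite | github.com/KrishanCd/SDVRP-Meta-Heuristic-Approach | PASA8.py | split_demand
-- ===== SOURCE A (Python) =====
-- def split_demand(demand, splitting_rule):
--     """Splits demand based on the largest-first strategy."""
--     splits = []
--     remaining_demand = demand
--     for portion in splitting_rule:
--         while remaining_demand >= portion:
--             splits.append(portion)
--             remaining_demand -= portion
--     return splits
-- ===== SOURCE B (Python) =====
-- def split_demand(demand, splitting_rule):
--     """Splits demand based on the largest-first strategy (closed-form count per portion)."""
--     splits = []
--     remaining_demand = demand
--     for portion in splitting_rule:
--         if portion > 0 and remaining_demand >= portion: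
--             count = remaining_demand // portion
--             splits.extend([portion] * count)
--             remaining_demand -= portion * count
--     return splits
-- ===== Notes on version B (the rewrite author's own statement) =====
-- stated objective: faster
-- what changed: The inner repeated-subtraction while loop is replaced by a closed-form division: per portion, count = remaining // portion is appended at once, so the loop count no longer depends on the demand value; intended as faster (in a timing run A timed out at n=16 where B returned, so no ratio could be measured).
-- outside the precondition, e.g. on split_demand(-1, [0]): A returns [], B returns []; on split_demand(0, [0]): A does not finish within the time limit, B returns []
import Mathlib
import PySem

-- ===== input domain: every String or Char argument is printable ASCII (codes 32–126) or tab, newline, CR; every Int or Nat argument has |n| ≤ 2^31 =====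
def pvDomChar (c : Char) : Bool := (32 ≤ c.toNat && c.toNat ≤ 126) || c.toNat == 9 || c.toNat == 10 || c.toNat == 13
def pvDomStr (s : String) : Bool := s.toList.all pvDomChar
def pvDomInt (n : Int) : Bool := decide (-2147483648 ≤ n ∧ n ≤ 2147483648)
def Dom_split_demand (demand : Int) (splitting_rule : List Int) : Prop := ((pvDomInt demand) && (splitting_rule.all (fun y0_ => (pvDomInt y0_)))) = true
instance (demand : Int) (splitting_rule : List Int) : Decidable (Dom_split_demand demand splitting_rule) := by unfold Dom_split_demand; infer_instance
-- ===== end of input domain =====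

-- B replaces A's inner repeated-subtraction while loop by a closed-form division count (intended as faster; in a timing run A timed out where B returned, so no ratio was measured); return value only, no mutation involved.

-- ===== PORT A =====
-- inner while loop of A: `while remaining >= portion: splits.append(portion); remaining -= portion`,
-- run with fuel (the fuel `remaining.toNat + 1` is enough whenever the Python loop terminates,
-- i.e. portion ≥ 1; Pre_ excludes non-positive portions, where Python diverges).
def pvInnerA (portion : Int) : Nat → List Int × Int → List Int × Int
  | 0, st => st
  | f + 1, st => if portion ≤ st.2 then pvInnerA portion f (st.1 ++ [portion], st.2 - portion) else st

def split_demand (demand : Int) (splitting_rule : List Int) : List Int :=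
  (splitting_rule.foldl (fun st portion => pvInnerA portion (st.2.toNat + 1) st) ([], demand)).1

-- ===== PORT B =====
def split_demand_alt (demand : Int) (splitting_rule : List Int) : List Int :=
  (splitting_rule.foldl (fun (st : List Int × Int) portion =>
      if 0 < portion ∧ portion ≤ st.2 then
        -- count = remaining // portion; splits.extend([portion]*count); remaining -= portion*count
        let count := Int.fdiv st.2 portion
        (st.1 ++ List.replicate count.toNat portion, st.2 - portion * count)
      else st) ([], demand)).1

-- ===== PRECONDITION & SPEC =====
-- Pre_ excludes splitting rules containing a non-positive portion: on such inputs A's inner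
-- while loop diverges whenever the remaining demand reaches that portion (e.g. (0, [0])),
-- and the natural domain of the splitting rule is positive portion sizes.
def Pre_split_demand (demand : Int) (splitting_rule : List Int) : Prop :=
  ∀ p ∈ splitting_rule, 0 < p
instance (demand : Int) (splitting_rule : List Int) : Decidable (Pre_split_demand demand splitting_rule) := by unfold Pre_split_demand; infer_instance

def pvWitness_split_demand : Int × List Int := (7, [5, 2, 1])

def Spec_split_demand (demand : Int) (splitting_rule : List Int) (out : List Int) : Prop := out = split_demand_alt demand splitting_rule
instance (demand : Int) (splitting_rule : List Int) (out : List Int) : Decidable (Spec_split_demand demand splitting_rule out) := by unfold Spec_split_demand; infer_instance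

-- ===== CLAIM (what is proved, stated in full; the proofs are below) =====
def Claim_equal_split_demand : Prop := ∀ (demand : Int) (splitting_rule : List Int), Dom_split_demand demand splitting_rule → Pre_split_demand demand splitting_rule → Spec_split_demand demand splitting_rule (split_demand demand splitting_rule)

-- ===== LEMMAS AND PROOFS =====

-- characterisation of A's inner while loop for a positive portion and sufficient fuel
theorem pvInnerA_char (p : Int) (hp : 0 < p) :
    ∀ (f : Nat) (acc : List Int) (r : Int), r.toNat < f →
      pvInnerA p f (acc, r) =
        if p ≤ r then (acc ++ List.replicate (Int.fdiv r p).toNat p, r - p * Int.fdiv r p)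
        else (acc, r) := by
  intro f
  induction f with
  | zero => intro acc r h; omega
  | succ f ih =>
    intro acc r h
    by_cases hle : p ≤ r
    · have hfd : Int.fdiv r p = Int.fdiv (r - p) p + 1 := by
        have := Int.add_mul_fdiv_right (r - p) 1 (by omega : p ≠ 0)
        simpa [sub_add_cancel] using this
      have hnn : 0 ≤ Int.fdiv (r - p) p := Int.fdiv_nonneg (by omega) (by omega)
      have hrec : pvInnerA p (f + 1) (acc, r) = pvInnerA p f (acc ++ [p], r - p) := by
        simp [pvInnerA, hle]
      rw [hrec, ih (acc ++ [p]) (r - p) (by omega)]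
      by_cases hle2 : p ≤ r - p
      · have ht : (Int.fdiv (r - p) p + 1).toNat = (Int.fdiv (r - p) p).toNat + 1 := by omega
        simp only [hle, hle2, if_pos, hfd]
        rw [Prod.mk.injEq]
        refine ⟨?_, by ring⟩
        rw [ht, List.replicate_succ, List.append_assoc]
        simp
      · have h0 : Int.fdiv (r - p) p = 0 := by
          have he : Int.fdiv (r - p) p = (r - p) / p := by
            rw [Int.fdiv_eq_ediv]; simp [le_of_lt hp]
          rw [he]
          exact Int.ediv_eq_zero_of_lt (by omega) (by omega)
        have h1 : Int.fdiv r p = 1 := by omega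
        simp [hle, hle2, h1]
    · simp [pvInnerA, hle]

-- one step of A's fold equals one step of B's fold on positive portions
theorem pv_step_eq (p : Int) (hp : 0 < p) (st : List Int × Int) :
    pvInnerA p (st.2.toNat + 1) st =
      (if 0 < p ∧ p ≤ st.2 then
        (st.1 ++ List.replicate (Int.fdiv st.2 p).toNat p, st.2 - p * Int.fdiv st.2 p)
      else st) := by
  obtain ⟨acc, r⟩ := st
  rw [pvInnerA_char p hp (r.toNat + 1) acc r (by omega)]
  by_cases hle : p ≤ r <;> simp [hle, hp]

theorem pv_fold_eq :
    ∀ (rule : List Int) (st : List Int × Int), (∀ p ∈ rule, 0 < p) →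
      rule.foldl (fun st portion => pvInnerA portion (st.2.toNat + 1) st) st =
      rule.foldl (fun (st : List Int × Int) portion =>
        if 0 < portion ∧ portion ≤ st.2 then
          (st.1 ++ List.replicate (Int.fdiv st.2 portion).toNat portion, st.2 - portion * Int.fdiv st.2 portion)
        else st) st := by
  intro rule
  induction rule with
  | nil => intro st _; rfl
  | cons p ps ih =>
    intro st hall
    have hp : 0 < p := hall p (by simp)
    simp only [List.foldl_cons]
    rw [pv_step_eq p hp st]
    exact ih _ (fun q hq => hall q (by simp [hq]))

-- ===== VERDICT (by name: the statement is the Claim_ definition above) =====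
theorem split_demand_spec : Claim_equal_split_demand := by
  intro demand rule _ hpre
  unfold Spec_split_demand split_demand split_demand_alt
  rw [pv_fold_eq rule ([], demand) hpre]
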